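-- pv_equiv track=rewrite | github.com/kun368/LeetCodeKt | src/main/java/normal/cat0/cat06/cat067/p672/main.py | flipLights
-- ===== SOURCE A (Python) =====
-- def flipLights(n: int, presses: int) -> int:
--     if presses == 0:
--         return 1
--     mask = (1 << min(n, 4)) - 1
--     cc = [int('1111', 2), int('0101', 2), int('1010', 2), int('0001', 2)]
--     vis = {mask}
--     for i in range(presses):
--         new = set()
--         for v in vis:
--             for c in cc:
--                 new.add((v ^ c) & mask)
--         vis = new
--     return len(vis)
-- ===== SOURCE B (Python) =====
-- def flipLights(n: int, presses: int) -> int: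
--     # Closed-form enumeration of the 16 button-parity combinations instead of layered BFS.
--     if presses <= 0:
--         return 1
--     mask = (1 << min(n, 4)) - 1
--     cc = [0b1111, 0b0101, 0b1010, 0b0001]
--     res = set()
--     for s in range(16):
--         k = 0
--         v = mask
--         for i in range(4):
--             if (s >> i) & 1:
--                 k += 1
--                 v ^= cc[i]
--         if k <= presses and (presses - k) % 2 == 0:
--             res.add(v & mask)
--     return len(res)
-- ===== Notes on version B (the rewrite author's own statement) =====
-- stated objective: faster
-- what changed: Replaces A's press-by-press BFS over light-state sets with a one-shot enumeration of the 16 button subsets, keeping a subset of size k iff k<=presses and presses-k is even (the parity combinations reachable in exactly `presses` presses).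
import Mathlib
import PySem

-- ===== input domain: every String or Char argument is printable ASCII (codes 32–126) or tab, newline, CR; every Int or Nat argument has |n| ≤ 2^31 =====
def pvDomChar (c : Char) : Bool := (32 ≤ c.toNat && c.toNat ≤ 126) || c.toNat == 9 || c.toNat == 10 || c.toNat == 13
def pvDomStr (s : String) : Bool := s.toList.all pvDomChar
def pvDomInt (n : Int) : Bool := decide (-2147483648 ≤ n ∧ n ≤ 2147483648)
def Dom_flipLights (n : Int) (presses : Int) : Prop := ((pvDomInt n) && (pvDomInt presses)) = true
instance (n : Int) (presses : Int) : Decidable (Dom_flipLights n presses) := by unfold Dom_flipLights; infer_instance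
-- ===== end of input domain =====

-- B replaces A's press-by-press BFS over light states by a one-shot enumeration of the 16
-- button-parity combinations reachable in exactly `presses` presses (k ≤ presses, presses-k even).

-- ===== PORT A =====
-- one iteration of A's loop body: new = {(v ^ c) & mask for v in vis for c in cc}
def flipStep (mask : Int) (cc : List Int) (vis : PySem.Set Int) : PySem.Set Int :=
  vis.foldl (fun new v =>
    cc.foldl (fun new c => PySem.Set.add new (PySem.Int.band (PySem.Int.bxor v c) mask)) new)
    PySem.Set.empty

def flipLights (n : Int) (presses : Int) : Int :=
  if presses = 0 then 1
  else
    -- 1 << min(n, 4); Pre_ excludes n < 0 here (Python ValueError: negative shift count)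
    let mask : Int := (1 <<< (min n 4).toNat) - 1
    let cc : List Int := [(PySem.Int.ofStrBase? "1111" 2).getD 0, (PySem.Int.ofStrBase? "0101" 2).getD 0,
                          (PySem.Int.ofStrBase? "1010" 2).getD 0, (PySem.Int.ofStrBase? "0001" 2).getD 0]
    let vis : PySem.Set Int := PySem.Set.ofList [mask]
    let vis := (PySem.List.pyRange 0 presses 1).foldl (fun vis _ => flipStep mask cc vis) vis
    (vis.length : Int)

-- ===== PORT B =====
-- (k, v) for subset s: k = number of chosen buttons, v = mask with the chosen cc's XORed in
def flipKV (mask : Int) (s : Int) (cc : List Int) : Int × Int :=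
  (PySem.List.enumerate cc 0).foldl
    (fun kv ic => if PySem.Int.band (s >>> ic.1.toNat) 1 = 1 then (kv.1 + 1, PySem.Int.bxor kv.2 ic.2) else kv)
    (0, mask)

def flipLights_alt (n : Int) (presses : Int) : Int :=
  if presses ≤ 0 then 1
  else
    -- 1 << min(n, 4); Pre_ excludes n < 0 here (Python ValueError: negative shift count)
    let mask : Int := (1 <<< (min n 4).toNat) - 1
    let cc : List Int := [15, 5, 10, 1]
    let res := (PySem.List.pyRange 0 16 1).foldl (fun res s =>
      let kv := flipKV mask s cc
      if kv.1 ≤ presses ∧ PySem.Int.mod (presses - kv.1) 2 = 0 then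
        PySem.Set.add res (PySem.Int.band kv.2 mask)
      else res) PySem.Set.empty
    (res.length : Int)

-- ===== PRECONDITION & SPEC =====
-- Pre_ excludes exactly the inputs where A raises ValueError: presses ≠ 0 together with n < 0
-- (A then evaluates 1 << n with n negative).
def Pre_flipLights (n : Int) (presses : Int) : Prop := presses = 0 ∨ 0 ≤ n
instance (n : Int) (presses : Int) : Decidable (Pre_flipLights n presses) := by unfold Pre_flipLights; infer_instance
def pvWitness_flipLights : Int × Int := (3, 2)

def Spec_flipLights (n : Int) (presses : Int) (out : Int) : Prop := out = flipLights_alt n presses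
instance (n : Int) (presses : Int) (out : Int) : Decidable (Spec_flipLights n presses out) := by unfold Spec_flipLights; infer_instance

-- ===== CLAIM (what is proved, stated in full; the proofs are below) =====
def Claim_equal_flipLights : Prop := ∀ (n : Int) (presses : Int), Dom_flipLights n presses → Pre_flipLights n presses → Spec_flipLights n presses (flipLights n presses)

-- ===== LEMMAS AND PROOFS =====

def ccL : List Int := [15, 5, 10, 1]

-- A's loop, as iteration of one layer
def iterA (mask : Int) (t : Nat) : PySem.Set Int := (flipStep mask ccL)^[t] [mask]

-- B's subset loop, mask and presses abstracted
def bodyB (mask p : Int) : PySem.Set Int :=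
  (PySem.List.pyRange 0 16 1).foldl (fun res s =>
    let kv := flipKV mask s ccL
    if kv.1 ≤ p ∧ PySem.Int.mod (p - kv.1) 2 = 0 then
      PySem.Set.add res (PySem.Int.band kv.2 mask)
    else res) PySem.Set.empty

lemma foldl_const_iterate {α β : Type} (f : α → α) (l : List β) (a : α) :
    l.foldl (fun x _ => f x) a = f^[l.length] a := by
  induction l generalizing a with
  | nil => rfl
  | cons h t ih => simpa [Function.iterate_succ_apply] using ih (f a)

lemma mem_foldl_add (g : Int → Int) (l : List Int) (acc : List Int) (a : Int) :
    a ∈ l.foldl (fun new c => PySem.Set.add new (g c)) acc ↔ a ∈ acc ∨ ∃ c ∈ l, a = g c := by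
  induction l generalizing acc with
  | nil => simp
  | cons h t ih => simp only [List.foldl_cons, ih, PySem.Set.mem_add, List.mem_cons]; aesop

lemma mem_flipStep_aux (mask : Int) (cc vis acc : List Int) (a : Int) :
    a ∈ vis.foldl (fun new v =>
        cc.foldl (fun new c => PySem.Set.add new (PySem.Int.band (PySem.Int.bxor v c) mask)) new) acc
      ↔ a ∈ acc ∨ ∃ v ∈ vis, ∃ c ∈ cc, a = PySem.Int.band (PySem.Int.bxor v c) mask := by
  induction vis generalizing acc with
  | nil => simp
  | cons h t ih => simp only [List.foldl_cons, ih, mem_foldl_add, List.mem_cons]; aesop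

lemma mem_flipStep (mask : Int) (cc vis : List Int) (a : Int) :
    a ∈ flipStep mask cc vis ↔ ∃ v ∈ vis, ∃ c ∈ cc, a = PySem.Int.band (PySem.Int.bxor v c) mask := by
  simp [flipStep, mem_flipStep_aux, PySem.Set.empty]

lemma nodup_foldl_add (g : Int → Int) (l : List Int) (acc : List Int) (h : acc.Nodup) :
    (l.foldl (fun new c => PySem.Set.add new (g c)) acc).Nodup := by
  induction l generalizing acc with
  | nil => exact h
  | cons c t ih => exact ih _ (PySem.Set.nodup_add _ _ h)

lemma nodup_flipStep (mask : Int) (cc vis : List Int) : (flipStep mask cc vis).Nodup := by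
  unfold flipStep
  have : ∀ acc : List Int, acc.Nodup → (vis.foldl (fun new v =>
      cc.foldl (fun new c => PySem.Set.add new (PySem.Int.band (PySem.Int.bxor v c) mask)) new) acc).Nodup := by
    induction vis with
    | nil => exact fun acc h => h
    | cons v t ih => exact fun acc h => ih _ (nodup_foldl_add _ _ _ h)
  exact this PySem.Set.empty List.nodup_nil

lemma flipStep_mem_congr (mask : Int) (cc s t : List Int) (h : ∀ a, a ∈ s ↔ a ∈ t) :
    ∀ a, a ∈ flipStep mask cc s ↔ a ∈ flipStep mask cc t := by
  intro a
  simp only [mem_flipStep]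
  constructor <;> rintro ⟨v, hv, hc⟩
  · exact ⟨v, (h v).mp hv, hc⟩
  · exact ⟨v, (h v).mpr hv, hc⟩

lemma iterate_mem (mask : Int) (cc s : List Int)
    (hfix : ∀ a, a ∈ flipStep mask cc s ↔ a ∈ s) :
    ∀ (t : Nat) (a : Int), a ∈ (flipStep mask cc)^[t] s ↔ a ∈ s := by
  intro t
  induction t with
  | zero => simp
  | succ k ih =>
    intro a
    rw [Function.iterate_succ_apply']
    exact (flipStep_mem_congr mask cc _ s ih a).trans (hfix a)

lemma iterate_length (mask : Int) (cc s : List Int)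
    (hfix : ∀ a, a ∈ flipStep mask cc s ↔ a ∈ s) (hnd : s.Nodup) (t : Nat) :
    ((flipStep mask cc)^[t] s).length = s.length := by
  cases t with
  | zero => rfl
  | succ k =>
    have hnd2 : ((flipStep mask cc)^[k + 1] s).Nodup := by
      rw [Function.iterate_succ_apply']; exact nodup_flipStep _ _ _
    exact ((List.perm_ext_iff_of_nodup hnd2 hnd).mpr (iterate_mem mask cc s hfix (k + 1))).length_eq

lemma A_eq (n p : Int) (hp : p ≠ 0) :
    flipLights n p = ((iterA ((1 <<< (min n 4).toNat) - 1) p.toNat).length : Int) := by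
  have hcc : [(PySem.Int.ofStrBase? "1111" 2).getD 0, (PySem.Int.ofStrBase? "0101" 2).getD 0,
              (PySem.Int.ofStrBase? "1010" 2).getD 0, (PySem.Int.ofStrBase? "0001" 2).getD 0] = ccL := by decide
  have hof : ∀ x : Int, PySem.Set.ofList [x] = [x] := fun x => rfl
  simp only [flipLights, if_neg hp, hcc, hof, foldl_const_iterate, PySem.List.length_pyRange_one,
    sub_zero, iterA]

lemma B_eq (n p : Int) (hp : 0 < p) :
    flipLights_alt n p = ((bodyB ((1 <<< (min n 4).toNat) - 1) p).length : Int) := by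
  simp only [flipLights_alt, if_neg (by omega : ¬ p ≤ 0), bodyB, ccL]

lemma A_ge3 (mask p : Int) (hp : 3 ≤ p)
    (hfix : ∀ a, a ∈ flipStep mask ccL (iterA mask 3) ↔ a ∈ iterA mask 3) :
    (iterA mask p.toNat).length = (iterA mask 3).length := by
  have hnd3 : (iterA mask 3).Nodup := by
    unfold iterA
    rw [show (3 : Nat) = 2 + 1 from rfl, Function.iterate_succ_apply']
    exact nodup_flipStep _ _ _
  have hsplit : p.toNat = (p.toNat - 3) + 3 := by omega
  unfold iterA at *
  rw [hsplit, Function.iterate_add_apply]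
  exact iterate_length mask ccL _ hfix hnd3 _

lemma flipKV_k_bounds (mask s : Int) :
    0 ≤ (flipKV mask s ccL).1 ∧ (flipKV mask s ccL).1 ≤ 4 := by
  have he : PySem.List.enumerate ccL 0 = [(0, 15), (1, 5), (2, 10), (3, 1)] := by decide
  simp only [flipKV, he, List.foldl_cons, List.foldl_nil]
  split_ifs <;> simp

lemma B_reduce (mask p q : Int) (h3 : 3 ≤ p) (hq3 : 3 ≤ q) (hq4 : q ≤ 4)
    (hpar : p % 2 = q % 2) : bodyB mask p = bodyB mask q := by
  unfold bodyB
  have hfun : (fun (res : PySem.Set Int) (s : Int) =>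
      let kv := flipKV mask s ccL
      if kv.1 ≤ p ∧ PySem.Int.mod (p - kv.1) 2 = 0 then
        PySem.Set.add res (PySem.Int.band kv.2 mask) else res)
    = (fun (res : PySem.Set Int) (s : Int) =>
      let kv := flipKV mask s ccL
      if kv.1 ≤ q ∧ PySem.Int.mod (q - kv.1) 2 = 0 then
        PySem.Set.add res (PySem.Int.band kv.2 mask) else res) := by
    funext res s
    have hk := flipKV_k_bounds mask s
    have hm1 : PySem.Int.mod (p - (flipKV mask s ccL).1) 2 = (p - (flipKV mask s ccL).1) % 2 :=
      PySem.Int.mod_eq_emod_of_pos (by norm_num)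
    have hm2 : PySem.Int.mod (q - (flipKV mask s ccL).1) 2 = (q - (flipKV mask s ccL).1) % 2 :=
      PySem.Int.mod_eq_emod_of_pos (by norm_num)
    show (if _ ∧ _ then _ else _) = (if _ ∧ _ then _ else _)
    rw [hm1, hm2]
    exact if_congr (by omega) rfl rfl
  rw [hfun]


lemma fix_of_subs {X Y : List Int} (h1 : ∀ a ∈ X, a ∈ Y) (h2 : ∀ a ∈ Y, a ∈ X) :
    ∀ a, a ∈ X ↔ a ∈ Y := fun a => ⟨h1 a, h2 a⟩

lemma main_mask (m p : Int) (hp : 0 < p)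
    (hfix : ∀ a, a ∈ flipStep m ccL (iterA m 3) ↔ a ∈ iterA m 3)
    (e1 : ((iterA m 1).length : Int) = ((bodyB m 1).length : Int))
    (e2 : ((iterA m 2).length : Int) = ((bodyB m 2).length : Int))
    (e3 : ((iterA m 3).length : Int) = ((bodyB m 3).length : Int))
    (e4 : ((iterA m 3).length : Int) = ((bodyB m 4).length : Int)) :
    ((iterA m p.toNat).length : Int) = ((bodyB m p).length : Int) := by
  rcases (by omega : p = 1 ∨ p = 2 ∨ 3 ≤ p) with rfl | rfl | h3
  · simpa using e1
  · simpa using e2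
  · rw [show (iterA m p.toNat).length = (iterA m 3).length from A_ge3 m p h3 hfix]
    rcases Int.emod_two_eq p with he | he
    · rw [B_reduce m p 4 h3 (by norm_num) (by norm_num) (by omega)]; exact e4
    · rw [B_reduce m p 3 h3 (by norm_num) (by norm_num) (by omega)]; exact e3

-- ===== VERDICT (by name: the statement is the Claim_ definition above) =====
theorem flipLights_spec : Claim_equal_flipLights := by
  intro n p _ hpre
  unfold Spec_flipLights
  rcases eq_or_ne p 0 with rfl | hp0
  · simp [flipLights, flipLights_alt]
  rcases Int.lt_or_le p 0 with hneg | hpos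
  · have hA : flipLights n p = 1 := by
      simp only [flipLights, if_neg hp0, PySem.List.pyRange_one_eq_nil (by omega : p ≤ 0),
        List.foldl_nil]
      rfl
    have hB : flipLights_alt n p = 1 := by simp [flipLights_alt, le_of_lt hneg]
    rw [hA, hB]
  · have hpos' : 0 < p := by omega
    rw [A_eq n p hp0, B_eq n p hpos']
    have hn : 0 ≤ n := by rcases hpre with h | h; · omega
                          · exact h
    rcases Int.lt_or_le n 4 with h4 | h4
    · interval_cases n
      · exact main_mask 0 p hpos' (fix_of_subs (by decide) (by decide))
          (by decide) (by decide) (by decide) (by decide)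
      · exact main_mask 1 p hpos' (fix_of_subs (by decide) (by decide))
          (by decide) (by decide) (by decide) (by decide)
      · exact main_mask 3 p hpos' (fix_of_subs (by decide) (by decide))
          (by decide) (by decide) (by decide) (by decide)
      · exact main_mask 7 p hpos' (fix_of_subs (by decide) (by decide))
          (by decide) (by decide) (by decide) (by decide)
    · rw [min_eq_right h4]
      exact main_mask 15 p hpos' (fix_of_subs (by decide) (by decide))
        (by decide) (by decide) (by decide) (by decide)
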